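-- pv_equiv track=rewrite | github.com/sharwariakre/CodeNarrator | backend/app/services/analysis_snapshot_service.py | _ambiguity_reducing_candidates
-- ===== SOURCE A (Python) =====
-- from typing import Dict, List, Set, Tuple
--
-- def _ambiguity_reducing_candidates(
--     files: List[str],
--     file_languages: Dict[str, str],
--     dominant_language: str,
-- ) -> List[Tuple[str, str]]:
--     by_language: Dict[str, List[str]] = {}
--     for file_path in files:
--         language = file_languages.get(file_path, "unknown")
--         by_language.setdefault(language, []).append(file_path)
--
--     for language_files in by_language.values():
--         language_files.sort()
--
--     candidates: List[Tuple[str, str]] = []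
--
--     # Mixed-language ambiguity: include one representative file per non-dominant language.
--     for language in sorted(by_language.keys()):
--         if language == dominant_language:
--             continue
--         file_path = by_language[language][0]
--         candidates.append(
--             (
--                 file_path,
--                 (
--                     "Reduces mixed-language ambiguity with one representative "
--                     f"'{language}' file."
--                 ),
--             )
--         )
--
--     # If still ambiguous (no entry points in earlier rules), include test file hints.
--     test_files = sorted(
--         file_path for file_path in files if "/test" in file_path or "tests/" in file_path
--     )
--     if test_files:
--         candidates.append(
--             (
--                 test_files[0],
--                 "Test file can clarify expected behavior when entry points are unclear.",
--             )
--         )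
--
--     return candidates
-- ===== SOURCE B (Python) =====
-- def _ambiguity_reducing_candidates(files, file_languages, dominant_language):
--     # One linear pass keeps only the lexicographic minimum file per language;
--     # no per-language lists are built or sorted.
--     rep = {}
--     for p in files:
--         lang = file_languages.get(p, "unknown")
--         if lang not in rep or p < rep[lang]:
--             rep[lang] = p
--     candidates = [
--         (
--             rep[lang],
--             "Reduces mixed-language ambiguity with one representative "
--             f"'{lang}' file.",
--         )
--         for lang in sorted(rep)
--         if lang != dominant_language
--     ]
--     tests = [p for p in files if "/test" in p or "tests/" in p]
--     if tests:
--         candidates.append(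
--             (
--                 min(tests),
--                 "Test file can clarify expected behavior when entry points are unclear.",
--             )
--         )
--     return candidates
-- ===== Notes on version B (the rewrite author's own statement) =====
-- stated objective: faster
-- what changed: B replaces A's group-files-into-per-language-lists / sort-every-group / take-the-head scheme by a single running-minimum pass that stores only one representative file per language, and picks the test hint with min() instead of sorting the matching files.
import Mathlib
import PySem

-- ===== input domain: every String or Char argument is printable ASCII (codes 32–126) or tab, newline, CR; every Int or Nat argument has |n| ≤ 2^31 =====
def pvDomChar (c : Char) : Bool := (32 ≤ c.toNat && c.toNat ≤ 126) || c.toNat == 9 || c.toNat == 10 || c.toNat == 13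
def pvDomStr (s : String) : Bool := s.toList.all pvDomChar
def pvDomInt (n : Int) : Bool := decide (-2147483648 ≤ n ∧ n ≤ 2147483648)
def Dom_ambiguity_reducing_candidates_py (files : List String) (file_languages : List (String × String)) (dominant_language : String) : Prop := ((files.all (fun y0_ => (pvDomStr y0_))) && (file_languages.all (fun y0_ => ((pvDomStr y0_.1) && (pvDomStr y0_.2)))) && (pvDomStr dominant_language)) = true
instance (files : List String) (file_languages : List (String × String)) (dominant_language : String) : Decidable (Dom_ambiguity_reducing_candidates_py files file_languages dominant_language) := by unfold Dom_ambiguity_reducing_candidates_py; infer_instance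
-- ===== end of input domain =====

-- B replaces A's group-into-per-language-lists / sort-each-group / take-head scheme by a single
-- running-minimum pass storing one representative per language, and takes the test hint with min
-- instead of sorting (alternative decomposition; return value only, no mutation either way).

-- ===== PORT A =====
def ambiguity_reducing_candidates_py (files : List String) (file_languages : List (String × String)) (dominant_language : String) : List (String × String) :=
  let fl := PySem.Dict.ofList file_languages
  -- by_language.setdefault(lang, []).append(p)  ==  by_language[lang] = by_language.get(lang, []) + [p]
  let by_language := files.foldl (fun d p => d.modify (fl.getD p "unknown") [] (fun v => v ++ [p])) PySem.Dict.empty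
  -- in-place sort of every value list
  let by_language2 : PySem.Dict String (List String) :=
    PySem.Dict.mk (by_language.items.map (fun kv => (kv.1, PySem.List.sorted kv.2 (fun x => x) false)))
  let candidates := (PySem.List.sorted by_language2.keys (fun x => x) false).foldl
    (fun acc language =>
      if language == dominant_language then acc
      else acc ++ [((PySem.List.pyGet? (by_language2.getD language []) 0).getD "",
        "Reduces mixed-language ambiguity with one representative '" ++ language ++ "' file.")]) []
  let test_files := PySem.List.sorted
    (files.filter (fun p => PySem.Str.isIn "/test" p || PySem.Str.isIn "tests/" p)) (fun x => x) false
  if test_files ≠ [] then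
    candidates ++ [((PySem.List.pyGet? test_files 0).getD "",
      "Test file can clarify expected behavior when entry points are unclear.")]
  else candidates

-- ===== PORT B =====
def ambiguity_reducing_candidates_py_alt (files : List String) (file_languages : List (String × String)) (dominant_language : String) : List (String × String) :=
  let fl := PySem.Dict.ofList file_languages
  let rep := files.foldl (fun d p =>
      let lang := fl.getD p "unknown"
      if !d.contains lang || decide (p < d.getD lang "") then d.insert lang p else d) PySem.Dict.empty
  let candidates := ((PySem.List.sorted rep.keys (fun x => x) false).filter (fun lang => lang != dominant_language)).map
    (fun lang => (rep.getD lang "",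
      "Reduces mixed-language ambiguity with one representative '" ++ lang ++ "' file."))
  let tests := files.filter (fun p => PySem.Str.isIn "/test" p || PySem.Str.isIn "tests/" p)
  match PySem.List.min? tests (fun x => x) with
  | some m => candidates ++ [(m, "Test file can clarify expected behavior when entry points are unclear.")]
  | none => candidates

-- ===== PRECONDITION & SPEC =====
def Spec_ambiguity_reducing_candidates_py (files : List String) (file_languages : List (String × String)) (dominant_language : String) (out : List (String × String)) : Prop := out = ambiguity_reducing_candidates_py_alt files file_languages dominant_language
instance (files : List String) (file_languages : List (String × String)) (dominant_language : String) (out : List (String × String)) : Decidable (Spec_ambiguity_reducing_candidates_py files file_languages dominant_language out) := by unfold Spec_ambiguity_reducing_candidates_py; infer_instance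

-- ===== CLAIM (what is proved, stated in full; the proofs are below) =====
def Claim_equal_ambiguity_reducing_candidates_py : Prop := ∀ (files : List String) (file_languages : List (String × String)) (dominant_language : String), Dom_ambiguity_reducing_candidates_py files file_languages dominant_language → Spec_ambiguity_reducing_candidates_py files file_languages dominant_language (ambiguity_reducing_candidates_py files file_languages dominant_language)

-- ===== LEMMAS AND PROOFS =====

-- running minimum as an Option fold
def omin (o : Option String) (x : String) : Option String :=
  some (match o with | none => x | some q => min q x)

theorem foldl_omin_some (t : List String) (a : String) :
    t.foldl omin (some a) = some (t.foldl min a) := by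
  induction t generalizing a with
  | nil => rfl
  | cons x t ih => simpa [omin] using ih (min a x)

theorem foldl_omin_none (xs : List String) :
    xs.foldl omin none = PySem.List.min? xs (fun y => y) := by
  cases xs with
  | nil => rfl
  | cons x t => simp [PySem.List.min?_id_cons, omin, foldl_omin_some]

-- A's grouping loop: the group of key k is the filter of files by key
theorem getD_groupFold (g : String → String) (l : List String) (d : PySem.Dict String (List String)) (k : String) :
    (l.foldl (fun d p => d.modify (g p) [] (fun v => v ++ [p])) d).getD k []
      = d.getD k [] ++ l.filter (fun p => g p == k) := by
  induction l generalizing d with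
  | nil => simp
  | cons x t ih =>
    simp only [List.foldl_cons, ih, PySem.Dict.getD_modify, List.filter_cons]
    by_cases h : k = g x
    · simp [h]
    · have : (g x == k) = false := by simpa [beq_iff_eq] using Ne.symm h
      simp [h, this]

-- B's running-minimum loop, one step
def repStep (g : String → String) (d : PySem.Dict String String) (p : String) : PySem.Dict String String :=
  if !d.contains (g p) || decide (p < d.getD (g p) "") then d.insert (g p) p else d

theorem get?_repFold (g : String → String) (l : List String) (d : PySem.Dict String String) (k : String) :
    (l.foldl (repStep g) d).get? k = (l.filter (fun p => g p == k)).foldl omin (d.get? k) := by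
  induction l generalizing d with
  | nil => rfl
  | cons x t ih =>
    simp only [List.foldl_cons, List.filter_cons]
    by_cases hk : g x = k
    · subst hk
      rw [ih]
      simp only [beq_self_eq_true, if_true, List.foldl_cons]
      congr 1
      cases hc : PySem.Dict.contains d (g x) with
      | false =>
        have hn : d.get? (g x) = none := (PySem.Dict.get?_eq_none_iff_contains d (g x)).mpr hc
        simp [repStep, hc, hn, omin, PySem.Dict.get?_insert_self]
      | true =>
        obtain ⟨q, hq⟩ : ∃ q, d.get? (g x) = some q := by
          cases h : d.get? (g x) with
          | none => rw [(PySem.Dict.get?_eq_none_iff_contains d (g x)).mp h] at hc; cases hc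
          | some q => exact ⟨q, rfl⟩
        have hgd : d.getD (g x) "" = q := by rw [PySem.Dict.getD_eq_get?_getD, hq]; rfl
        by_cases hlt : x < q
        · simp [repStep, hc, hgd, hlt, omin, hq, PySem.Dict.get?_insert_self, min_eq_right (le_of_lt hlt)]
        · simp [repStep, hc, hgd, hlt, omin, hq, min_eq_left (le_of_not_gt hlt)]
    · have hb : (g x == k) = false := by simpa [beq_iff_eq] using hk
      rw [ih]
      simp only [hb, Bool.false_eq_true, if_false]
      congr 1
      unfold repStep
      split
      · exact PySem.Dict.get?_insert_of_ne d x (Ne.symm hk)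
      · rfl


theorem keys_repFold (g : String → String) (l : List String) (d : PySem.Dict String String) :
    (l.foldl (repStep g) d).keys = PySem.Set.update d.keys (l.map g) := by
  induction l generalizing d with
  | nil => rfl
  | cons x t ih =>
    simp only [List.foldl_cons, List.map_cons, ih]
    have hupd : PySem.Set.update d.keys (g x :: t.map g)
        = PySem.Set.update (PySem.Set.add d.keys (g x)) (t.map g) := rfl
    rw [hupd]
    congr 1
    cases hc : PySem.Dict.contains d (g x) with
    | false =>
      have hm : g x ∉ d.keys := fun hm => by
        rw [(PySem.Dict.contains_iff_mem_keys d (g x)).mpr hm] at hc; cases hc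
      simp [repStep, hc, PySem.Dict.keys_insert_of_not_contains d x hc, PySem.Set.add,
        PySem.Set.contains, hm]
    | true =>
      have hm : g x ∈ d.keys := (PySem.Dict.contains_iff_mem_keys d (g x)).mp hc
      have : PySem.Set.add d.keys (g x) = d.keys := by
        simp [PySem.Set.add, PySem.Set.contains, hm]
      rw [this]
      unfold repStep
      split
      · exact PySem.Dict.keys_insert_of_contains d x hc
      · rfl


-- the dict whose values are mapped elementwise: lookups map through
theorem get?_mk_map {ν ν' : Type} (f : ν → ν') (l : List (String × ν)) (k : String) :
    (PySem.Dict.mk (l.map (fun kv => (kv.1, f kv.2)))).get? k = ((PySem.Dict.mk l).get? k).map f := by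
  induction l with
  | nil => rfl
  | cons x t ih =>
    rw [List.map_cons]
    cases x with
    | mk a b =>
      rw [PySem.Dict.get?_mk_cons, PySem.Dict.get?_mk_cons]
      by_cases h : (a == k) = true
      · simp [h]
      · simp only [if_neg h]
        exact ih

-- head of sorted(xs) is the value of min(xs)
theorem head_sorted_eq_min (xs : List String) (m : String)
    (hm : PySem.List.min? xs (fun y => y) = some m) :
    (PySem.List.pyGet? (PySem.List.sorted xs (fun x => x) false) 0).getD "" = m := by
  have hne : xs ≠ [] := by
    intro h; subst h; cases hm
  cases hs : PySem.List.sorted xs (fun x => x) false with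
  | nil => exact absurd ((PySem.List.sorted_eq_nil_iff xs (fun x => x) false).mp hs) hne
  | cons h t =>
    have hhx : h ∈ xs := by
      have : h ∈ PySem.List.sorted xs (fun x => x) false := by rw [hs]; exact List.mem_cons_self
      rwa [PySem.List.mem_sorted] at this
    have h1 : h ≤ m := PySem.List.key_head_sorted_le xs (fun x => x) hs m (PySem.List.min?_mem hm)
    have h2 : m ≤ h := PySem.List.min?_isMin hm h hhx
    have : h = m := le_antisymm h1 h2
    simp [PySem.List.pyGet?, PySem.List.pyIdx?, this]

-- skip-style loop is filter-then-map
theorem foldl_skip_append {β : Type} (v : String) (f : String → β) (l : List String) (acc : List β) :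
    l.foldl (fun acc x => if x == v then acc else acc ++ [f x]) acc
      = acc ++ (l.filter (fun x => x != v)).map f := by
  have : (fun (acc : List β) (x : String) => if x == v then acc else acc ++ [f x])
      = fun acc x => if (x != v) = true then acc ++ [f x] else acc := by
    funext acc x; cases h : x == v <;> simp [bne, h]
  rw [this, PySem.List.foldl_append_if]

theorem sorted?nonempty_group (g : String → String) (files : List String) (k : String)
    (hk : k ∈ PySem.Set.ofList (files.map g)) :
    files.filter (fun p => g p == k) ≠ [] := by
  rw [PySem.Set.mem_ofList, List.mem_map] at hk
  obtain ⟨p, hp, hgp⟩ := hk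
  intro h
  have : p ∈ files.filter (fun p => g p == k) := by
    rw [List.mem_filter]; exact ⟨hp, by simp [hgp]⟩
  rw [h] at this; cases this

theorem ports_agree (files : List String) (file_languages : List (String × String)) (dominant_language : String) :
    ambiguity_reducing_candidates_py files file_languages dominant_language
      = ambiguity_reducing_candidates_py_alt files file_languages dominant_language := by
  unfold ambiguity_reducing_candidates_py ambiguity_reducing_candidates_py_alt
  simp only []
  set g : String → String := fun p => (PySem.Dict.ofList file_languages).getD p "unknown" with hg
  set byL := files.foldl (fun d p => d.modify (g p) [] (fun v => v ++ [p])) PySem.Dict.empty with hbyL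
  have hstep : (fun (d : PySem.Dict String String) p =>
      let lang := g p
      if !d.contains lang || decide (p < d.getD lang "") then d.insert lang p else d) = repStep g := rfl
  rw [hstep]
  set rep := files.foldl (repStep g) PySem.Dict.empty with hrep
  -- keys of the two dicts coincide
  have hkeysA : byL.keys = PySem.Set.ofList (files.map g) := by
    rw [hbyL, PySem.Dict.keys_foldl_modify_key files g [] (fun _ p => fun v => v ++ [p])]
    simp [PySem.Set.update_nil_left]
  have hkeys2 : (PySem.Dict.mk (byL.items.map (fun kv => (kv.1, PySem.List.sorted kv.2 (fun x => x) false)))).keys = byL.keys := by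
    simp [PySem.Dict.keys, List.map_map]
  have hkeysB : rep.keys = PySem.Set.ofList (files.map g) := by
    rw [hrep, keys_repFold]
    simp [PySem.Set.update_nil_left]
  -- the per-language candidate lists coincide
  have hcand :
      (PySem.List.sorted (PySem.Dict.mk (byL.items.map (fun kv => (kv.1, PySem.List.sorted kv.2 (fun x => x) false)))).keys (fun x => x) false).foldl
        (fun acc language =>
          if language == dominant_language then acc
          else acc ++ [((PySem.List.pyGet? ((PySem.Dict.mk (byL.items.map (fun kv => (kv.1, PySem.List.sorted kv.2 (fun x => x) false)))).getD language []) 0).getD "",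
            "Reduces mixed-language ambiguity with one representative '" ++ language ++ "' file.")]) []
      = ((PySem.List.sorted rep.keys (fun x => x) false).filter (fun lang => lang != dominant_language)).map
          (fun lang => (rep.getD lang "",
            "Reduces mixed-language ambiguity with one representative '" ++ lang ++ "' file.")) := by
    rw [foldl_skip_append, hkeys2, hkeysA, hkeysB, List.nil_append]
    apply List.map_congr_left
    intro lang hlang
    have hk : lang ∈ PySem.Set.ofList (files.map g) := by
      have := List.mem_filter.mp hlang
      have h2 := (PySem.List.mem_sorted _ _ _ _).mp this.1
      exact h2
    -- the group is nonempty, so it has a first minimum m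
    have hgrp := sorted?nonempty_group g files lang hk
    obtain ⟨m, hm⟩ : ∃ m, PySem.List.min? (files.filter (fun p => g p == lang)) (fun y => y) = some m := by
      cases h : PySem.List.min? (files.filter (fun p => g p == lang)) (fun y => y) with
      | none => exact absurd ((PySem.List.min?_eq_none_iff _ _).mp h) hgrp
      | some m => exact ⟨m, rfl⟩
    -- A's side: the stored group is the filter, its sorted head is m
    have hblD : byL.getD lang [] = files.filter (fun p => g p == lang) := by
      rw [hbyL, getD_groupFold]; simp
    have hbl? : byL.get? lang = some (files.filter (fun p => g p == lang)) := by
      cases h : byL.get? lang with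
      | none =>
        rw [PySem.Dict.getD_eq_get?_getD, h] at hblD
        exact absurd hblD.symm hgrp
      | some v =>
        rw [PySem.Dict.getD_eq_get?_getD, h] at hblD
        simp only [Option.getD_some] at hblD
        rw [hblD]
    have h2 : (PySem.Dict.mk (byL.items.map (fun kv => (kv.1, PySem.List.sorted kv.2 (fun x => x) false)))).get? lang
        = some (PySem.List.sorted (files.filter (fun p => g p == lang)) (fun x => x) false) := by
      rw [get?_mk_map (fun v => PySem.List.sorted v (fun x => x) false) byL.items lang]
      have : PySem.Dict.mk byL.items = byL := rfl
      rw [this, hbl?]; rfl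
    -- B's side: rep stores exactly m
    have hrepD : rep.get? lang = some m := by
      rw [hrep, get?_repFold, PySem.Dict.get?_empty, foldl_omin_none, hm]
    rw [PySem.Dict.getD_eq_get?_getD, h2, PySem.Dict.getD_eq_get?_getD, hrepD]
    simp only [Option.getD_some]
    rw [head_sorted_eq_min _ m hm]
  rw [hcand]
  -- the test-file hint coincides
  cases ht : PySem.List.min? (files.filter (fun p => PySem.Str.isIn "/test" p || PySem.Str.isIn "tests/" p)) (fun x => x) with
  | none =>
    have : files.filter (fun p => PySem.Str.isIn "/test" p || PySem.Str.isIn "tests/" p) = [] :=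
      (PySem.List.min?_eq_none_iff _ _).mp ht
    rw [this]
    simp [PySem.List.sorted_eq_nil_iff]
  | some m =>
    have hne : files.filter (fun p => PySem.Str.isIn "/test" p || PySem.Str.isIn "tests/" p) ≠ [] := by
      intro h; rw [h] at ht; cases ht
    have hs : PySem.List.sorted (files.filter (fun p => PySem.Str.isIn "/test" p || PySem.Str.isIn "tests/" p)) (fun x => x) false ≠ [] := by
      rw [Ne, PySem.List.sorted_eq_nil_iff]; exact hne
    rw [if_pos hs, head_sorted_eq_min _ m ht]

-- ===== VERDICT (by name: the statement is the Claim_ definition above) =====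
theorem ambiguity_reducing_candidates_py_spec : Claim_equal_ambiguity_reducing_candidates_py := by
  intro files file_languages dominant_language _
  exact ports_agree files file_languages dominant_language
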